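-- pv_equiv track=rewrite | github.com/Radomir21/2024-Cryptanalysis | Lab_2/lab_2.py | crit_22_monogram
-- ===== SOURCE A (Python) =====
-- def crit_22_monogram(L, A_frq, k_x=12):
--     H0 = 0
--     H1 = 0
--
--     massive = {key: 0 for key in A_frq}
--
--     for sequence in L:
--         freq_map = massive.copy()
--
--         for char in sequence:
--             if char in freq_map:
--                 freq_map[char] += 1
--
--         # Проверяем, есть ли символы с частотой < k_x
--         if any(freq < k_x for freq in freq_map.values()):
--             H1 += 1
--         else:
--             H0 += 1
--
--     return f'H1 = {H1}, H0 = {H0}'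
-- ===== SOURCE B (Python) =====
-- def crit_22_monogram(L, A_frq, k_x=12):
--     # Sort-and-window strategy: instead of tallying a frequency table per sequence,
--     # sort the alphabet symbols of the sequence and detect a symbol with >= k_x
--     # occurrences as a constant window s[i] == s[i + k_x - 1] in the sorted list.
--     keys = set(A_frq)
--     if k_x <= 0:
--         return f'H1 = 0, H0 = {len(L)}'
--     H0 = 0
--     for sequence in L:
--         s = sorted(c for c in sequence if c in keys)
--         frequent = {a for a, b in zip(s, s[k_x - 1:]) if a == b}
--         if len(frequent) == len(keys):
--             H0 += 1
--     return f'H1 = {len(L) - H0}, H0 = {H0}'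
-- ===== Notes on version B (the rewrite author's own statement) =====
-- stated objective: alternative
-- what changed: B replaces A's per-sequence frequency-table build (dict copy, per-char tally, scan of the values) by a sort-and-window algorithm: it sorts the sequence's alphabet symbols and detects each symbol with at least k_x occurrences as an equal pair in zip(s, s[k_x-1:]) over the sorted list, classifying the sequence H0 when the set of such symbols has the alphabet's size; the trivial k_x <= 0 case is answered in closed form.
import Mathlib
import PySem

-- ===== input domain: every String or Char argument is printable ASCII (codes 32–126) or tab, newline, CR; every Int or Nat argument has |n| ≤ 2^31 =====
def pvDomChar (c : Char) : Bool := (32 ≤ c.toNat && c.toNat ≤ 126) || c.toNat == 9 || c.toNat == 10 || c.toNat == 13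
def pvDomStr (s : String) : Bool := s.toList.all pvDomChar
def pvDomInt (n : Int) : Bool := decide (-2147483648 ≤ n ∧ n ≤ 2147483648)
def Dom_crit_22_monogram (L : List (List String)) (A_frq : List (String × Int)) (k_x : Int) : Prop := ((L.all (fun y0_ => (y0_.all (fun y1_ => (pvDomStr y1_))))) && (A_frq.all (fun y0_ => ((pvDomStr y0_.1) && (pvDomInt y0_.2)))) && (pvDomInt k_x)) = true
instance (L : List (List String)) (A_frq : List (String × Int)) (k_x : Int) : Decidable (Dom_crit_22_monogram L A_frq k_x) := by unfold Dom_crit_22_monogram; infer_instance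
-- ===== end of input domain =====

-- B replaces A's per-sequence frequency table by a sort-and-window algorithm: it sorts the
-- sequence's alphabet symbols and finds the symbols occurring >= k_x times as equal pairs in
-- zip(s, s[k_x-1:]); the trivial k_x <= 0 case is answered in closed form.

-- ===== PORT A =====
-- A_frq is a dict; `for key in A_frq` iterates its keys, i.e. the first components here.
def crit_22_monogram (L : List (List String)) (A_frq : List (String × Int)) (k_x : Int) : String :=
  -- H0 = 0; H1 = 0
  -- massive = {key: 0 for key in A_frq}
  let massive : PySem.Dict String Int :=
    A_frq.foldl (fun d key => d.insert key.1 0) PySem.Dict.empty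
  let HH : Int × Int := L.foldl (fun HH sequence =>
    -- freq_map = massive.copy()
    let freq_map := sequence.foldl (fun fm char =>
      -- if char in freq_map: freq_map[char] += 1
      if fm.contains char then fm.modify char 0 (· + 1) else fm) massive
    -- if any(freq < k_x for freq in freq_map.values()): H1 += 1 else: H0 += 1
    if freq_map.values.any (fun freq => freq < k_x) then (HH.1, HH.2 + 1) else (HH.1 + 1, HH.2))
    (0, 0)
  "H1 = " ++ PySem.Int.toStr HH.2 ++ ", H0 = " ++ PySem.Int.toStr HH.1

-- ===== PORT B =====
-- `set(A_frq)` on the dict A_frq is the set of its keys, i.e. the first components here.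
def crit_22_monogram_alt (L : List (List String)) (A_frq : List (String × Int)) (k_x : Int) : String :=
  let keys : PySem.Set String := PySem.Set.ofList (A_frq.map (·.1))
  if k_x ≤ 0 then
    "H1 = 0, H0 = " ++ PySem.Int.toStr (L.length : Int)
  else
    let H0 : Int := L.foldl (fun H0 sequence =>
      -- s = sorted(c for c in sequence if c in keys)
      let s := PySem.List.sorted (sequence.filter (fun c => PySem.Set.contains keys c)) (fun x => x) false
      -- frequent = {a for a, b in zip(s, s[k_x - 1:]) if a == b}
      let frequent : PySem.Set String :=
        PySem.Set.ofList (((s.zip (PySem.List.slice s (some (k_x - 1)) none)).filter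
          (fun p => p.1 == p.2)).map (·.1))
      if PySem.Set.len frequent = PySem.Set.len keys then H0 + 1 else H0) 0
    "H1 = " ++ PySem.Int.toStr ((L.length : Int) - H0) ++ ", H0 = " ++ PySem.Int.toStr H0

-- ===== PRECONDITION & SPEC =====
def Spec_crit_22_monogram (L : List (List String)) (A_frq : List (String × Int)) (k_x : Int) (out : String) : Prop := out = crit_22_monogram_alt L A_frq k_x
instance (L : List (List String)) (A_frq : List (String × Int)) (k_x : Int) (out : String) : Decidable (Spec_crit_22_monogram L A_frq k_x out) := by unfold Spec_crit_22_monogram; infer_instance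

-- ===== CLAIM (what is proved, stated in full; the proofs are below) =====
def Claim_equal_crit_22_monogram : Prop := ∀ (L : List (List String)) (A_frq : List (String × Int)) (k_x : Int), Dom_crit_22_monogram L A_frq k_x → Spec_crit_22_monogram L A_frq k_x (crit_22_monogram L A_frq k_x)

-- ===== LEMMAS AND PROOFS =====

-- Membership in A's initial table is membership among the alphabet keys.
theorem pvContains_massive (l : List (String × Int)) (d : PySem.Dict String Int) (k : String) :
    ((l.foldl (fun d key => d.insert key.1 0) d).contains k = true)
    ↔ (d.contains k = true ∨ k ∈ l.map (·.1)) := by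
  induction l generalizing d with
  | nil => simp
  | cons x xs ih =>
    rw [List.foldl_cons, ih]
    simp only [PySem.Dict.contains_insert, Bool.or_eq_true, beq_iff_eq, List.map_cons,
      List.mem_cons]
    tauto

-- Every entry of A's initial table is 0.
theorem pvGetD_massive (l : List (String × Int)) (d : PySem.Dict String Int) (k : String)
    (h : d.getD k 0 = 0) :
    (l.foldl (fun d key => d.insert key.1 0) d).getD k 0 = 0 := by
  induction l generalizing d with
  | nil => exact h
  | cons x xs ih =>
    rw [List.foldl_cons]
    refine ih _ ?_
    rw [PySem.Dict.getD_insert]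
    split <;> simp [h]

-- A's initial table has distinct keys.
theorem pvNodup_massive (l : List (String × Int)) (d : PySem.Dict String Int)
    (h : d.keys.Nodup) :
    (l.foldl (fun d key => d.insert key.1 0) d).keys.Nodup := by
  induction l generalizing d with
  | nil => exact h
  | cons x xs ih => exact ih _ (PySem.Dict.nodup_keys_insert _ _ _ h)

-- The guarded counting loop keeps the key set and turns each present entry into
-- 'old value + number of occurrences'; absent keys stay untouched.
theorem pvGuardLoop (seq : List String) (d : PySem.Dict String Int) :
    (seq.foldl (fun fm char =>
        if fm.contains char then fm.modify char 0 (· + 1) else fm) d).keys = d.keys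
    ∧ ∀ k, (seq.foldl (fun fm char =>
        if fm.contains char then fm.modify char 0 (· + 1) else fm) d).getD k 0
      = d.getD k 0 + (if d.contains k then (List.count k seq : Int) else 0) := by
  induction seq generalizing d with
  | nil => exact ⟨rfl, fun k => by simp⟩
  | cons c cs ih =>
    rw [List.foldl_cons]
    by_cases hc : d.contains c = true
    · rw [if_pos hc]
      have hcont : ∀ k', (d.modify c 0 (· + 1)).contains k' = d.contains k' := by
        intro k'
        rw [PySem.Dict.contains_modify]
        by_cases hk : k' = c
        · subst hk; simp [hc]
        · simp [hk]
      have hkeys : (d.modify c 0 (· + 1)).keys = d.keys := by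
        rw [PySem.Dict.keys_modify, PySem.Dict.keys_insert_of_contains _ _ hc]
      rcases ih (d.modify c 0 (· + 1)) with ⟨ihk, ihg⟩
      refine ⟨ihk.trans hkeys, fun k => ?_⟩
      rw [ihg k, hcont k, PySem.Dict.getD_modify]
      by_cases hk : k = c
      · subst hk
        rw [if_pos rfl]
        simp only [hc, if_true, List.count_cons_self]
        push_cast
        ring
      · rw [if_neg hk]
        by_cases hdk : d.contains k = true
        · simp only [hdk, if_true]
          rw [List.count_cons]
          have : (c == k) = false := by
            by_cases h : c = k
            · exact absurd h.symm hk
            · simp [h]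
          rw [this]
          push_cast
          ring
        · simp [hdk]
    · rw [if_neg hc]
      rcases ih d with ⟨ihk, ihg⟩
      refine ⟨ihk, fun k => ?_⟩
      rw [ihg k]
      by_cases hdk : d.contains k = true
      · have hkc : (c == k) = false := by
          by_cases h : c = k
          · subst h; exact absurd hdk hc
          · simp [h]
        simp only [hdk, if_true]
        rw [List.count_cons, hkc]
        push_cast
        ring
      · simp [hdk]

-- 'any' over the values is 'any' over the looked-up keys.
theorem pvValuesAny (d : PySem.Dict String Int) (hn : d.keys.Nodup) (P : Int → Bool) :
    d.values.any P = d.keys.any (fun k => P (d.getD k 0)) := by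
  rw [Bool.eq_iff_iff, List.any_eq_true, List.any_eq_true]
  constructor
  · rintro ⟨v, hv, hPv⟩
    rcases List.mem_map.1 (show v ∈ d.items.map Prod.snd from hv) with ⟨kv, hkv, rfl⟩
    refine ⟨kv.1, List.mem_map.2 ⟨kv, hkv, rfl⟩, ?_⟩
    rw [PySem.Dict.getD_of_get?_eq_some _ _
      (PySem.Dict.get?_of_mem_items _ (show (kv.1, kv.2) ∈ d.items by simpa using hkv) hn)]
    exact hPv
  · rintro ⟨k, hk, hPk⟩
    rcases List.mem_map.1 (show k ∈ d.items.map Prod.fst from hk) with ⟨kv, hkv, rfl⟩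
    refine ⟨kv.2, List.mem_map.2 ⟨kv, hkv, rfl⟩, ?_⟩
    rw [PySem.Dict.getD_of_get?_eq_some _ _
      (PySem.Dict.get?_of_mem_items _ (show (kv.1, kv.2) ∈ d.items by simpa using hkv) hn)] at hPk
    exact hPk

-- A's per-sequence test equals 'some alphabet key occurs fewer than k_x times'.
theorem pvSeqTest (A_frq : List (String × Int)) (seq : List String) (k_x : Int) :
    ((seq.foldl (fun fm char =>
        if fm.contains char then fm.modify char 0 (· + 1) else fm)
        (A_frq.foldl (fun d key => d.insert key.1 0) PySem.Dict.empty)).values.any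
          (fun freq => freq < k_x))
    = (A_frq.any (fun p => decide ((PySem.List.count seq p.1 : Int) < k_x))) := by
  rcases pvGuardLoop seq (A_frq.foldl (fun d key => d.insert key.1 0) PySem.Dict.empty)
    with ⟨hkeys, hgetD⟩
  rw [pvValuesAny _ (by rw [hkeys]; exact pvNodup_massive A_frq _ (by simp)) _]
  rw [Bool.eq_iff_iff, List.any_eq_true, List.any_eq_true]
  constructor
  · rintro ⟨k, hk, hPk⟩
    rw [hkeys] at hk
    have hc : (A_frq.foldl (fun d key => d.insert key.1 0)
        (PySem.Dict.empty : PySem.Dict String Int)).contains k = true :=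
      (PySem.Dict.contains_iff_mem_keys _ _).2 hk
    rcases (pvContains_massive A_frq PySem.Dict.empty k).1 hc with h | hm
    · simp [PySem.Dict.contains_empty] at h
    · rcases List.mem_map.1 hm with ⟨p, hp, rfl⟩
      refine ⟨p, hp, ?_⟩
      rw [hgetD p.1, if_pos hc, pvGetD_massive A_frq PySem.Dict.empty p.1 (by simp)] at hPk
      simp only [decide_eq_true_eq, PySem.List.count_eq]
      simpa using hPk
  · rintro ⟨p, hp, hPp⟩
    have hc : (A_frq.foldl (fun d key => d.insert key.1 0)
        (PySem.Dict.empty : PySem.Dict String Int)).contains p.1 = true :=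
      (pvContains_massive A_frq PySem.Dict.empty p.1).2
        (Or.inr (List.mem_map.2 ⟨p, hp, rfl⟩))
    refine ⟨p.1, hkeys ▸ (PySem.Dict.contains_iff_mem_keys _ _).1 hc, ?_⟩
    rw [hgetD p.1, if_pos hc, pvGetD_massive A_frq PySem.Dict.empty p.1 (by simp)]
    simp only [decide_eq_true_eq, PySem.List.count_eq] at hPp
    simpa using hPp

-- A's outer fold with per-sequence predicate q.
theorem pvFoldA (L : List (List String)) (q : List String → Bool) (a b : Int) :
    (L.foldl (fun (HH : Int × Int) (s : List String) =>
      if q s then (HH.1, HH.2 + 1) else (HH.1 + 1, HH.2)) (a, b))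
    = (a + ((L.length : Int) - (L.countP q : Int)), b + (L.countP q : Int)) := by
  induction L generalizing a b with
  | nil => simp
  | cons x xs ih =>
    rw [List.foldl_cons]
    by_cases h : q x = true
    · rw [if_pos h, ih]
      simp only [List.length_cons, List.countP_cons, h, if_true, Prod.mk.injEq]
      constructor <;> push_cast <;> ring
    · rw [if_neg h, ih]
      have h0 : (if q x = true then 1 else 0) = 0 := by simp [h]
      simp only [List.length_cons, List.countP_cons, h0, Nat.add_zero, Prod.mk.injEq]
      constructor <;> push_cast <;> ring

-- In a sorted list bounded below by c, an occurrence of c at index m forces m+1 copies of c.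
theorem pvCountOfGet (c : String) :
    ∀ (t : List String) (m : Nat), t.Pairwise (· ≤ ·) → (∀ y ∈ t, c ≤ y) →
      t[m]? = some c → m + 1 ≤ t.count c := by
  intro t
  induction t with
  | nil => intro m _ _ h; simp at h
  | cons h t' ih =>
    intro m hp hb hg
    cases m with
    | zero =>
      simp at hg
      subst hg
      simp [List.count_cons_self]
    | succ n =>
      simp at hg
      have hct' : c ∈ t' := List.mem_of_getElem? hg
      have hhc : h = c :=
        le_antisymm ((List.pairwise_cons.1 hp).1 c hct') (hb h (by simp))
      have := ih n (List.pairwise_cons.1 hp).2 (fun y hy => hb y (by simp [hy])) hg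
      subst hhc
      rw [List.count_cons_self]
      omega

-- Converse: m+1 copies of c in a sorted list bounded below by c put c at index m.
theorem pvGetOfCount (c : String) :
    ∀ (t : List String) (m : Nat), t.Pairwise (· ≤ ·) → (∀ y ∈ t, c ≤ y) →
      m + 1 ≤ t.count c → t[m]? = some c := by
  intro t
  induction t with
  | nil => intro m _ _ h; simp at h
  | cons h t' ih =>
    intro m hp hb hc
    have hmem : c ∈ h :: t' := List.count_pos_iff.1 (by omega)
    have hhc : h = c := by
      rcases List.mem_cons.1 hmem with h1 | h1
      · exact h1.symm
      · exact le_antisymm ((List.pairwise_cons.1 hp).1 c h1) (hb h (by simp))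
    subst hhc
    cases m with
    | zero => simp
    | succ n =>
      rw [List.count_cons_self] at hc
      have := ih n (List.pairwise_cons.1 hp).2 (fun y hy => hb y (by simp [hy])) (by omega)
      simpa using this

-- The windowed zip over a sorted list names exactly the values occurring at least m+1 times.
theorem pvMemZip (x : String) (m : Nat) :
    ∀ (s : List String), s.Pairwise (· ≤ ·) →
      ((x ∈ ((s.zip (s.drop m)).filter (fun p => p.1 == p.2)).map (·.1))
        ↔ m + 1 ≤ s.count x) := by
  intro s
  induction s with
  | nil => intro _; simp
  | cons c t ih =>
    intro hp
    have hbc : ∀ y ∈ c :: t, c ≤ y := by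
      intro y hy
      rcases List.mem_cons.1 hy with h1 | h1
      · exact h1 ▸ le_refl c
      · exact (List.pairwise_cons.1 hp).1 y h1
    have htail := ih (List.pairwise_cons.1 hp).2
    rcases hd : (c :: t).drop m with _ | ⟨d, rest⟩
    · -- the sequence is too short: both sides are false
      have hlen : t.length + 1 ≤ m := by
        have h' := congrArg List.length hd
        simp [List.length_drop] at h'
        omega
      constructor
      · intro hx; simp at hx
      · intro hx
        have hc := List.count_le_length (l := c :: t) (a := x)
        simp only [List.length_cons] at hc
        omega
    · -- decompose the zip into its head pair and the tail's zip
      have hget : (c :: t)[m]? = some d := by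
        have h0 : ((c :: t).drop m)[0]? = (c :: t)[m]? := by
          simp [List.getElem?_drop]
        rw [hd] at h0
        simpa using h0.symm
      have hrest : rest = t.drop m := by
        have h' := congrArg List.tail hd
        rw [List.tail_drop] at h'
        simpa [List.drop_succ_cons] using h'.symm
      subst hrest
      have hzip : (c :: t).zip (d :: t.drop m) = (c, d) :: t.zip (t.drop m) := rfl
      rw [hzip]
      have hfc : (((c, d) :: t.zip (t.drop m)).filter (fun p => p.1 == p.2)).map (·.1)
          = (if c = d then [c] else [])
            ++ ((t.zip (t.drop m)).filter (fun p => p.1 == p.2)).map (·.1) := by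
        simp only [List.filter_cons]
        by_cases hcd : c = d
        · simp [hcd]
        · simp [hcd]
      rw [hfc]
      constructor
      · intro hmem
        rcases List.mem_append.1 hmem with h1 | h1
        · -- the head window fired: c = d and x = c, apply the counting lemma at index m
          have hcd : c = d := by
            by_contra hne
            rw [if_neg hne] at h1
            simp at h1
          rw [if_pos hcd] at h1
          have hxc : x = c := by simpa using h1
          have hgc : (c :: t)[m]? = some c := by
            rw [hget]
            exact congrArg some hcd.symm
          rw [hxc]
          exact pvCountOfGet c (c :: t) m hp hbc hgc
        · -- witness in the tail zip
          have h2 := htail.1 h1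
          have hmono : List.count x t ≤ List.count x (c :: t) := by
            rw [List.count_cons]
            split <;> omega
          omega
      · intro hcnt
        by_cases hxc : x = c
        · have hgc : (c :: t)[m]? = some c := pvGetOfCount c (c :: t) m hp hbc (hxc ▸ hcnt)
          have hcd : c = d := by
            rw [hget] at hgc
            exact (Option.some.inj hgc).symm
          refine List.mem_append.2 (Or.inl ?_)
          rw [if_pos hcd]
          simp [hxc]
        · have hcnt' : m + 1 ≤ List.count x t := by
            have he : List.count x (c :: t) = List.count x t := by
              rw [List.count_cons]
              simp [Ne.symm hxc]
            omega
          exact List.mem_append.2 (Or.inr (htail.2 hcnt'))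

-- B's per-sequence test: the window set fills the alphabet iff no key is rare.
theorem pvBTest (A_frq : List (String × Int)) (seq : List String) (k_x : Int) (hk : 1 ≤ k_x) :
    (PySem.Set.len (PySem.Set.ofList
        ((((PySem.List.sorted (seq.filter (fun c =>
              PySem.Set.contains (PySem.Set.ofList (A_frq.map (·.1))) c)) (fun x => x) false).zip
            (PySem.List.slice (PySem.List.sorted (seq.filter (fun c =>
              PySem.Set.contains (PySem.Set.ofList (A_frq.map (·.1))) c)) (fun x => x) false)
              (some (k_x - 1)) none)).filter (fun p => p.1 == p.2)).map (·.1)))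
      = PySem.Set.len (PySem.Set.ofList (A_frq.map (·.1))))
    ↔ ¬ (A_frq.any (fun p => decide ((PySem.List.count seq p.1 : Int) < k_x)) = true) := by
  set keys : List String := PySem.Set.ofList (A_frq.map (·.1)) with hkeysdef
  set s : List String :=
    PySem.List.sorted (seq.filter (fun c => PySem.Set.contains keys c)) (fun x => x) false with hsdef
  have hsp : s.Pairwise (· ≤ ·) := by
    have := PySem.List.sorted_pairwise (xs := seq.filter (fun c => PySem.Set.contains keys c))
      (key := fun x => x)
    simpa [hsdef] using this
  set m : Nat := (k_x - 1).toNat with hmdef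
  have hslice : PySem.List.slice s (some (k_x - 1)) none = s.drop m :=
    PySem.List.slice_from s (show (0:Int) ≤ k_x - 1 by omega)
  set freq : List String :=
    PySem.Set.ofList (((s.zip (s.drop m)).filter (fun p => p.1 == p.2)).map (·.1)) with hfreqdef
  rw [hslice]
  -- count of x in s, for x in keys, is its count in seq
  have hcount : ∀ x ∈ keys, s.count x = seq.count x := by
    intro x hxk
    have hperm : s.Perm (seq.filter (fun c => PySem.Set.contains keys c)) :=
      PySem.List.sorted_perm _ _ _
    rw [hperm.count_eq]
    exact List.count_filter (by simpa [PySem.Set.contains_iff] using hxk)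
  -- membership in the window set, for any x
  have hmemfreq : ∀ x, x ∈ freq ↔ (x ∈ keys ∧ (k_x ≤ (seq.count x : Int))) := by
    intro x
    rw [hfreqdef, PySem.Set.mem_ofList, pvMemZip x m s hsp]
    constructor
    · intro hc
      have hxs : x ∈ s := List.count_pos_iff.1 (by omega)
      have hxk : x ∈ keys := by
        have := (PySem.List.mem_sorted (xs := seq.filter
          (fun c => PySem.Set.contains keys c)) (key := fun x => x) (rev := false) (x := x)).1
          (by simpa [hsdef] using hxs)
        simpa [PySem.Set.contains_iff] using (List.mem_filter.1 this).2
      refine ⟨hxk, ?_⟩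
      rw [← hcount x hxk] at *
      omega
    · rintro ⟨hxk, hxc⟩
      rw [hcount x hxk]
      omega
  have hnodf : freq.Nodup := PySem.Set.nodup_ofList _
  have hnodk : keys.Nodup := PySem.Set.nodup_ofList _
  have hsub : freq ⊆ keys := fun x hx => ((hmemfreq x).1 hx).1
  -- len equality ↔ keys ⊆ freq, via Finsets
  have hlen : (PySem.Set.len freq = PySem.Set.len keys) ↔ ∀ x ∈ keys, x ∈ freq := by
    constructor
    · intro he x hxk
      have hcard : freq.toFinset.card = keys.toFinset.card := by
        rw [List.toFinset_card_of_nodup hnodf, List.toFinset_card_of_nodup hnodk]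
        simpa [PySem.Set.len] using he
      have hfs : freq.toFinset ⊆ keys.toFinset := by
        intro y hy
        exact List.mem_toFinset.2 (hsub (List.mem_toFinset.1 hy))
      have heq : freq.toFinset = keys.toFinset :=
        Finset.eq_of_subset_of_card_le hfs (le_of_eq hcard.symm)
      have hx' : x ∈ freq.toFinset := by
        rw [heq]
        exact List.mem_toFinset.2 hxk
      exact List.mem_toFinset.1 hx'
    · intro hsup
      have : freq.Perm keys := by
        apply List.Subperm.perm_of_length_le
        · exact List.subperm_of_subset hnodf hsub
        · exact (List.subperm_of_subset hnodk hsup).length_le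
      simpa [PySem.Set.len] using this.length_eq
  rw [hlen]
  simp only [List.any_eq_true, not_exists, not_and]
  constructor
  · intro hall p hp
    have hxk : p.1 ∈ keys := by
      rw [hkeysdef, PySem.Set.mem_ofList]
      exact List.mem_map.2 ⟨p, hp, rfl⟩
    have := ((hmemfreq p.1).1 (hall p.1 hxk)).2
    simp only [decide_eq_true_eq, PySem.List.count_eq]
    omega
  · intro hnone x hxk
    rw [hmemfreq x]
    refine ⟨hxk, ?_⟩
    rcases List.mem_map.1 (by rw [hkeysdef, PySem.Set.mem_ofList] at hxk; exact hxk)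
      with ⟨p, hp, rfl⟩
    have := hnone p hp
    simp only [decide_eq_true_eq, PySem.List.count_eq] at this
    omega

-- ===== VERDICT (by name: the statement is the Claim_ definition above) =====
theorem crit_22_monogram_spec : Claim_equal_crit_22_monogram := by
  intro L A_frq k_x _
  show crit_22_monogram L A_frq k_x = crit_22_monogram_alt L A_frq k_x
  set q : List String → Bool :=
    fun s => A_frq.any (fun p => decide ((PySem.List.count s p.1 : Int) < k_x)) with hq
  have hA : crit_22_monogram L A_frq k_x
      = "H1 = " ++ PySem.Int.toStr (L.countP q : Int) ++ ", H0 = "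
        ++ PySem.Int.toStr ((L.length : Int) - (L.countP q : Int)) := by
    unfold crit_22_monogram
    simp only [pvSeqTest]
    rw [pvFoldA L q 0 0]
    norm_num
  rw [hA]
  unfold crit_22_monogram_alt
  by_cases hk : k_x ≤ 0
  · rw [if_pos hk]
    have hq0 : L.countP q = 0 := by
      rw [List.countP_eq_zero]
      intro s _
      rw [hq]
      simp only [List.any_eq_true, not_exists, not_and]
      intro p _
      simp only [decide_eq_true_eq, PySem.List.count_eq]
      have : (0 : Int) ≤ (List.count p.1 s : Int) := by positivity
      omega
    rw [hq0]
    norm_num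
    rfl
  · rw [if_neg hk]
    have hk1 : 1 ≤ k_x := by omega
    have hfold : (L.foldl (fun H0 sequence =>
        let s := PySem.List.sorted (sequence.filter (fun c =>
          PySem.Set.contains (PySem.Set.ofList (A_frq.map (·.1))) c)) (fun x => x) false
        let frequent : PySem.Set String :=
          PySem.Set.ofList (((s.zip (PySem.List.slice s (some (k_x - 1)) none)).filter
            (fun p => p.1 == p.2)).map (·.1))
        if PySem.Set.len frequent = PySem.Set.len (PySem.Set.ofList (A_frq.map (·.1)))
          then H0 + 1 else H0) 0)
        = ((L.countP (fun s => !q s) : Int)) := by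
      have := PySem.List.foldl_if_add_one
        (p := fun sequence => decide (PySem.Set.len (PySem.Set.ofList
          ((((PySem.List.sorted (sequence.filter (fun c =>
              PySem.Set.contains (PySem.Set.ofList (A_frq.map (·.1))) c)) (fun x => x) false).zip
            (PySem.List.slice (PySem.List.sorted (sequence.filter (fun c =>
              PySem.Set.contains (PySem.Set.ofList (A_frq.map (·.1))) c)) (fun x => x) false)
              (some (k_x - 1)) none)).filter (fun p => p.1 == p.2)).map (·.1)))
          = PySem.Set.len (PySem.Set.ofList (A_frq.map (·.1)))))
        (l := L) (a := 0)
      simp only [decide_eq_true_eq] at this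
      rw [this, zero_add]
      refine congrArg _ (List.countP_congr fun s _ => ?_)
      rw [decide_eq_true_eq, Bool.not_eq_true', ← Bool.not_eq_true]
      exact pvBTest A_frq s k_x hk1
    rw [hfold]
    have hsplit : L.countP q + L.countP (fun s => !q s) = L.length := by
      have h := List.length_eq_countP_add_countP q (l := L)
      simpa using h.symm
    have h1 : (L.length : Int) - (L.countP (fun s => !q s) : Int) = (L.countP q : Int) := by
      omega
    have h2 : (L.length : Int) - (L.countP q : Int) = (L.countP (fun s => !q s) : Int) := by
      omega
    show _ = "H1 = " ++ PySem.Int.toStr ((L.length : Int) - (L.countP (fun s => !q s) : Int))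
      ++ ", H0 = " ++ PySem.Int.toStr ((L.countP (fun s => !q s) : Int))
    rw [h1, h2]
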